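-- pv_equiv track=rewrite | github.com/LireEruel/Algorithm | brute force/BOJ_1018_체스판_다시_칠하기.py | checkCount
-- ===== SOURCE A (Python) =====
-- import copy
--
-- def checkCount(board, startX, startY):
--     countW = 0
--     w_board = copy.deepcopy(board)
--     for x in range(startX, startX + 8):
--         if x == len(w_board):
--             break
--         for y in range(startY, startY + 8):
--             if y == len(w_board[0]):
--                 break
--             if x == startX and y == startY:
--                 if w_board[startX][startY] == 'B':
--                     countW += 1
--                     w_board[startX][startY] = 'W'
--             elif y == startY:
--                 if w_board[x - 1][y] == w_board[x][y]:
--                     w_board[x][y] = "W" if w_board[x][y] == "B" else "B"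
--                     countW += 1
--             else:
--                 if w_board[x][y - 1] == w_board[x][y]:
--                     w_board[x][y] = "W" if w_board[x][y] == "B" else "B"
--                     countW += 1
--     countB = 0
--     b_board = copy.deepcopy(board)
--     for x in range(startX, startX + 8):
--         if x == len(b_board):
--             break
--         for y in range(startY, startY + 8):
--             if y == len(b_board[0]):
--                 break
--             if x == startX and y == startY:
--                 if b_board[startX][startY] == 'W':
--                     countB += 1
--                     b_board[startX][startY] = 'B'
--             elif y == startY:
--                 if b_board[x - 1][y] == b_board[x][y]:
--                     b_board[x][y] = "W" if b_board[x][y] == "B" else "B"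
--                     countB += 1
--             else:
--                 if b_board[x][y - 1] == b_board[x][y]:
--                     b_board[x][y] = "W" if b_board[x][y] == "B" else "B"
--                     countB += 1
--     return countW if countW <= countB else countB
-- ===== SOURCE B (Python) =====
-- def checkCount(board, startX, startY):
--     # Columnar frontier DP: transpose the clipped window and advance every row
--     # in lockstep per column, tracking only 'flipped?' flags against the
--     # original cells (no copies, no repainted values, both anchors in one pass).
--     if startX == len(board) or startY == len(board[0]):
--         # the scan covers no cell: the outer/inner break fires immediately
--         return 0
--     w = min(startY + 8, len(board[0])) - startY
--     win = [row[startY:startY + w] for row in board[startX:startX + 8]]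
--     cols = [[row[j] for row in win] for j in range(w)]
--
--     def flip(c):
--         return "W" if c == "B" else "B"
--
--     def step(prev_cell, prev_flipped, cur):
--         # cur must be repainted iff it equals the previous cell's final colour
--         return cur == (flip(prev_cell) if prev_flipped else prev_cell)
--
--     # column 0: a chain down the rows, seeded by the anchor cell per pattern
--     col0 = cols[0]
--     flagsW = [col0[0] == "B"]
--     flagsB = [col0[0] == "W"]
--     for i in range(1, len(col0)):
--         flagsW.append(step(col0[i - 1], flagsW[i - 1], col0[i]))
--         flagsB.append(step(col0[i - 1], flagsB[i - 1], col0[i]))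
--     cntW, cntB = sum(flagsW), sum(flagsB)
--     # remaining columns: all rows advance in lockstep from the previous column
--     prevcol = col0
--     for col in cols[1:]:
--         flagsW = [step(p, f, c) for p, f, c in zip(prevcol, flagsW, col)]
--         flagsB = [step(p, f, c) for p, f, c in zip(prevcol, flagsB, col)]
--         cntW += sum(flagsW)
--         cntB += sum(flagsB)
--         prevcol = col
--     return min(cntW, cntB)
-- ===== Notes on version B (the rewrite author's own statement) =====
-- stated objective: alternative
-- what changed: B replaces A's two row-major mutating passes over full-board deepcopies by one columnar frontier DP: it transposes the clipped window and advances all rows in lockstep column by column, carrying only boolean 'flipped?' flags per row and comparing original cells, counting both anchor patterns in the same pass.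
-- outside the precondition, e.g. on checkCount([['W'], ['B'], ['W']], -2, 0): A returns 3, B returns 0
import Mathlib
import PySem

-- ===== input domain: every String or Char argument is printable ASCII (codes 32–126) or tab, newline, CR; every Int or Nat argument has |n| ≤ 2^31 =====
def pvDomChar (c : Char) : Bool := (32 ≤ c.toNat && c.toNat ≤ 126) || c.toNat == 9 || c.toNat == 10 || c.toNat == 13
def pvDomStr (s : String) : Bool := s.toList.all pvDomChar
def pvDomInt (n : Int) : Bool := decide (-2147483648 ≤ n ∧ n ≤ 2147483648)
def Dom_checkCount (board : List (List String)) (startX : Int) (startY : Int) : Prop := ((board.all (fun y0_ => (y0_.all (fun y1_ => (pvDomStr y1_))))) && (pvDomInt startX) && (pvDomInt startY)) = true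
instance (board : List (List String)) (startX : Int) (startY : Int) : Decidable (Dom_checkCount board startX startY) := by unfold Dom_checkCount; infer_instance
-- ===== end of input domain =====

-- B replaces A's two row-major mutating passes over deepcopies by one columnar
-- lockstep pass over the clipped window carrying boolean repaint flags; the
-- equivalence is about the return value (A mutates only its own deepcopies).

-- ===== PORT A =====
-- Indices are nonnegative and in range on every read/write under Pre_ (negative starts are
-- outside Pre_), so getD/toNat indexing is exact there.
def pvGetCell (b : List (List String)) (x y : Int) : String :=
  (b.getD x.toNat []).getD y.toNat ""

def pvSetCell (b : List (List String)) (x y : Int) (v : String) : List (List String) :=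
  b.set x.toNat ((b.getD x.toNat []).set y.toNat v)

-- the inner 'for y in range(startY, startY+8)' loop of A, with its break on len(board[0]);
-- 'bad'/'good' are the two literals of the duplicated first branch ('B'/'W' resp. 'W'/'B')
def pvInnerA (sx sy x : Int) (bad good : String) :
    List Int → List (List String) → Int → List (List String) × Int
  | [], b, cnt => (b, cnt)
  | y :: ys, b, cnt =>
    if y = ((b.getD 0 []).length : Int) then (b, cnt)
    else if x = sx ∧ y = sy then
      (if pvGetCell b sx sy = bad then
        pvInnerA sx sy x bad good ys (pvSetCell b sx sy good) (cnt + 1)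
      else pvInnerA sx sy x bad good ys b cnt)
    else if y = sy then
      (if pvGetCell b (x - 1) y = pvGetCell b x y then
        pvInnerA sx sy x bad good ys
          (pvSetCell b x y (if pvGetCell b x y = "B" then "W" else "B")) (cnt + 1)
      else pvInnerA sx sy x bad good ys b cnt)
    else
      (if pvGetCell b x (y - 1) = pvGetCell b x y then
        pvInnerA sx sy x bad good ys
          (pvSetCell b x y (if pvGetCell b x y = "B" then "W" else "B")) (cnt + 1)
      else pvInnerA sx sy x bad good ys b cnt)

-- the outer 'for x in range(startX, startX+8)' loop of A, with its break on len(board)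
def pvOuterA (sx sy : Int) (bad good : String) :
    List Int → List (List String) → Int → List (List String) × Int
  | [], b, cnt => (b, cnt)
  | x :: xs, b, cnt =>
    if x = (b.length : Int) then (b, cnt)
    else
      let st := pvInnerA sx sy x bad good (PySem.List.pyRange sy (sy + 8) 1) b cnt
      pvOuterA sx sy bad good xs st.1 st.2

def checkCount (board : List (List String)) (startX : Int) (startY : Int) : Int :=
  let countW := (pvOuterA startX startY "B" "W" (PySem.List.pyRange startX (startX + 8) 1) board 0).2
  let countB := (pvOuterA startX startY "W" "B" (PySem.List.pyRange startX (startX + 8) 1) board 0).2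
  if countW ≤ countB then countW else countB

-- ===== PORT B =====
def pvFlip (c : String) : String := if c = "B" then "W" else "B"

-- Source B's step: cur must be repainted iff it equals the previous cell's final colour
def pvStep (prev : String) (pf : Bool) (cur : String) : Bool :=
  cur == (if pf then pvFlip prev else prev)

-- Source B's column-0 loop: the chain of repaint flags down a list of cells
def pvChainFlags : String → Bool → List String → List Bool
  | _, _, [] => []
  | prev, pf, c :: cs => pvStep prev pf c :: pvChainFlags c (pvStep prev pf c) cs

-- sum(flags): Python sums booleans as ints
def pvSumB (fs : List Bool) : Int := (fs.map (fun b => if b then (1 : Int) else 0)).sum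

-- Source B's 'for col in cols[1:]' loop: all rows advance in lockstep per column
def pvColsLoop : List (List String) → List String → List Bool → List Bool → Int → Int → Int × Int
  | [], _, _, _, cW, cB => (cW, cB)
  | col :: rest, prevcol, fW, fB, cW, cB =>
    let nW := (prevcol.zip (fW.zip col)).map (fun t => pvStep t.1 t.2.1 t.2.2)
    let nB := (prevcol.zip (fB.zip col)).map (fun t => pvStep t.1 t.2.1 t.2.2)
    pvColsLoop rest col nW nB (cW + pvSumB nW) (cB + pvSumB nB)

def checkCount_alt (board : List (List String)) (startX : Int) (startY : Int) : Int :=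
  if startX = (board.length : Int) ∨ startY = ((board.getD 0 []).length : Int) then 0
  else
    let w : Int := min (startY + 8) ((board.getD 0 []).length : Int) - startY
    let win := (PySem.List.slice board (some startX) (some (startX + 8))).map
      (fun row => PySem.List.slice row (some startY) (some (startY + w)))
    let cols := (List.range w.toNat).map (fun j => win.map (fun row => row.getD j ""))
    let col0 := cols.getD 0 []
    let o := col0.getD 0 ""
    let fW := (o == "B") :: pvChainFlags o (o == "B") col0.tail
    let fB := (o == "W") :: pvChainFlags o (o == "W") col0.tail
    let r := pvColsLoop cols.tail col0 fW fB (pvSumB fW) (pvSumB fB)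
    min r.1 r.2

-- ===== PRECONDITION & SPEC =====
-- Pre_ restricts to the natural domain of the task (non-negative start, start within bounds,
-- every scanned row long enough for the scanned column range): outside it A either raises
-- IndexError or its value depends on Python negative-index wraparound / on ragged rows
-- escaping the len(board[0]) break check.
def Pre_checkCount (board : List (List String)) (startX : Int) (startY : Int) : Prop :=
  0 ≤ startX ∧
  ((board ≠ [] ∧ startY = ((board.getD 0 []).length : Int)) ∨
    startX = (board.length : Int) ∨
    (startX < (board.length : Int) ∧ 0 ≤ startY ∧
      startY < ((board.getD 0 []).length : Int) ∧
      ∀ x : Nat, x < min (startX.toNat + 8) board.length →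
        (startX.toNat ≤ x →
          min (startY.toNat + 8) (board.getD 0 []).length ≤ (board.getD x []).length)))

instance (board : List (List String)) (startX : Int) (startY : Int) :
    Decidable (Pre_checkCount board startX startY) := by
  unfold Pre_checkCount; infer_instance

def pvWitness_checkCount : List (List String) × Int × Int :=
  ([["B", "W"], ["W", "B"]], 0, 0)

def Spec_checkCount (board : List (List String)) (startX : Int) (startY : Int) (out : Int) : Prop := out = checkCount_alt board startX startY
instance (board : List (List String)) (startX : Int) (startY : Int) (out : Int) : Decidable (Spec_checkCount board startX startY out) := by unfold Spec_checkCount; infer_instance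

-- ===== CLAIM (what is proved, stated in full; the proofs are below) =====
def Claim_equal_checkCount : Prop := ∀ (board : List (List String)) (startX : Int) (startY : Int), Dom_checkCount board startX startY → Pre_checkCount board startX startY → Spec_checkCount board startX startY (checkCount board startX startY)

-- ===== LEMMAS AND PROOFS =====

-- proof-side carried-value scans: the common intermediate between A's mutating
-- passes and B's flag DP (pvRowGo/pvColGo re-read the ORIGINAL board and carry
-- the previous cell's final colour as a string)
def pvRowGo (row : List String) : List Int → String → Int → String × Int
  | [], prev, cnt => (prev, cnt)
  | y :: ys, prev, cnt =>
    let cur := row.getD y.toNat ""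
    if cur = prev then pvRowGo row ys (pvFlip cur) (cnt + 1)
    else pvRowGo row ys cur cnt

def pvColGo (board : List (List String)) (sy endY : Int) :
    List Int → String → Int → Int
  | [], _, cnt => cnt
  | x :: xs, colPrev, cnt =>
    let row := board.getD x.toNat []
    let cur := row.getD sy.toNat ""
    if cur = colPrev then
      pvColGo board sy endY xs (pvFlip cur)
        (pvRowGo row (PySem.List.pyRange (sy + 1) endY 1) (pvFlip cur) (cnt + 1)).2
    else
      pvColGo board sy endY xs cur
        (pvRowGo row (PySem.List.pyRange (sy + 1) endY 1) cur cnt).2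

def pvPattern (board : List (List String)) (sx sy endX endY : Int) (bad : String) : Int :=
  let row0 := board.getD sx.toNat []
  let o := row0.getD sy.toNat ""
  let cp := if o = bad then pvFlip o else o
  let c0 : Int := if o = bad then 1 else 0
  let c1 := (pvRowGo row0 (PySem.List.pyRange (sy + 1) endY 1) cp c0).2
  pvColGo board sy endY (PySem.List.pyRange (sx + 1) endX 1) cp c1


theorem pv_len_setCell (b : List (List String)) (x y : Int) (v : String) :
    (pvSetCell b x y v).length = b.length := by
  simp [pvSetCell]

theorem pv_getD_setCell_ne (b : List (List String)) (x y : Int) (v : String)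
    (r : Nat) (hr : r ≠ x.toNat) :
    (pvSetCell b x y v).getD r [] = b.getD r [] := by
  simp [pvSetCell, List.getD_eq_getElem?_getD, List.getElem?_set_ne (Ne.symm hr)]

theorem pv_getD_setCell_self (b : List (List String)) (x y : Int) (v : String)
    (h : x.toNat < b.length) :
    (pvSetCell b x y v).getD x.toNat [] = (b.getD x.toNat []).set y.toNat v := by
  simp [pvSetCell, List.getD_eq_getElem?_getD, h]

theorem pv_rowlen_setCell (b : List (List String)) (x y : Int) (v : String) (r : Nat) :
    ((pvSetCell b x y v).getD r []).length = (b.getD r []).length := by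
  by_cases hr : r = x.toNat
  · subst hr
    by_cases h : x.toNat < b.length
    · rw [pv_getD_setCell_self b x y v h]; simp
    · simp [pvSetCell, List.getD_eq_getElem?_getD, h]
  · rw [pv_getD_setCell_ne b x y v r hr]

theorem pv_getD_set_self (l : List String) (j : Nat) (v : String) (h : j < l.length) :
    (l.set j v).getD j "" = v := by
  simp [List.getD_eq_getElem?_getD, h]

theorem pv_getD_set_ne (l : List String) (i j : Nat) (v : String) (h : i ≠ j) :
    (l.set j v).getD i "" = l.getD i "" := by
  simp [List.getD_eq_getElem?_getD, List.getElem?_set_ne (Ne.symm h)]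

theorem pv_inner_sim (sx sy x : Int) (bad good : String) (W : Int) (row : List String)
    (hR : min (sy + 8) W ≤ (row.length : Int)) (_hx : 0 ≤ x) (hsy : 0 ≤ sy) :
    ∀ (k : Nat) (t : Int) (b : List (List String)) (cnt : Int) (prev : String),
      sy < t → t ≤ W → t + k ≤ sy + 8 →
      x.toNat < b.length →
      ((b.getD 0 []).length : Int) = W →
      (b.getD x.toNat []).length = row.length →
      (∀ j : Nat, t.toNat ≤ j → (b.getD x.toNat []).getD j "" = row.getD j "") →
      (b.getD x.toNat []).getD (t - 1).toNat "" = prev →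
      ∃ b', pvInnerA sx sy x bad good (PySem.List.pyRange t (t + k) 1) b cnt
              = (b', (pvRowGo row (PySem.List.pyRange t (min (t + k) W) 1) prev cnt).2)
        ∧ b'.length = b.length
        ∧ (∀ r : Nat, (b'.getD r []).length = (b.getD r []).length)
        ∧ (∀ r : Nat, r ≠ x.toNat → b'.getD r [] = b.getD r [])
        ∧ (∀ j : Nat, j < t.toNat → (b'.getD x.toNat []).getD j "" = (b.getD x.toNat []).getD j "") := by
  intro k
  induction k with
  | zero =>
    intro t b cnt prev ht htW htk hxb hW hlen hrow hprev
    refine ⟨b, ?_, rfl, fun _ => rfl, fun _ _ => rfl, fun _ _ => rfl⟩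
    rw [PySem.List.pyRange_one_eq_nil (by push_cast; omega),
        PySem.List.pyRange_one_eq_nil (by push_cast; omega)]
    rfl
  | succ n ih =>
    intro t b cnt prev ht htW htk hxb hW hlen hrow hprev
    rw [PySem.List.pyRange_one_cons (by push_cast; omega)]
    simp only [pvInnerA]
    by_cases hTW : t = W
    · rw [if_pos (by omega)]
      refine ⟨b, ?_, rfl, fun _ => rfl, fun _ _ => rfl, fun _ _ => rfl⟩
      rw [PySem.List.pyRange_one_eq_nil (by omega)]
      rfl
    · rw [if_neg (by omega), if_neg (by rintro ⟨-, h2⟩; omega), if_neg (by omega)]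
      have hg1 : pvGetCell b x (t - 1) = prev := hprev
      have hcur : pvGetCell b x t = row.getD t.toNat "" := by
        simpa [pvGetCell] using hrow t.toNat le_rfl
      have htlt : t.toNat < row.length := by omega
      have hcast : t + ((n + 1 : Nat) : Int) = (t + 1) + (n : Nat) := by push_cast; ring
      rw [hg1, hcur, hcast,
          PySem.List.pyRange_one_cons (by omega : t < min ((t + 1) + (n : Nat)) W)]
      simp only [pvRowGo]
      by_cases heq : row.getD t.toNat "" = prev
      · rw [if_pos heq.symm, if_pos heq]
        have hset := pv_getD_setCell_self b x t
          (if row.getD t.toNat "" = "B" then "W" else "B") hxb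
        obtain ⟨b', e, p1, p2, p3, p4⟩ := ih (t + 1)
          (pvSetCell b x t (if row.getD t.toNat "" = "B" then "W" else "B")) (cnt + 1)
          (pvFlip (row.getD t.toNat ""))
          (by omega) (by omega) (by push_cast at htk ⊢; omega)
          (by rw [pv_len_setCell]; exact hxb)
          (by rw [pv_rowlen_setCell]; exact hW)
          (by rw [pv_rowlen_setCell]; exact hlen)
          (by
            intro j hj
            rw [hset, pv_getD_set_ne _ _ _ _ (by omega)]
            exact hrow j (by omega))
          (by
            rw [hset]
            have : ((t + 1) - 1).toNat = t.toNat := by omega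
            rw [this, pv_getD_set_self _ _ _ (by rw [hlen]; exact htlt)]
            rfl)
        refine ⟨b', e, by rw [p1, pv_len_setCell], ?_, ?_, ?_⟩
        · intro r; rw [p2 r, pv_rowlen_setCell]
        · intro r hr; rw [p3 r hr, pv_getD_setCell_ne _ _ _ _ _ hr]
        · intro j hj
          rw [p4 j (by omega), hset, pv_getD_set_ne _ _ _ _ (by omega)]
      · rw [if_neg (fun h => heq h.symm), if_neg heq]
        obtain ⟨b', e, p1, p2, p3, p4⟩ := ih (t + 1) b cnt (row.getD t.toNat "")
          (by omega) (by omega) (by push_cast at htk ⊢; omega)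
          hxb hW hlen
          (fun j hj => hrow j (by omega))
          (by
            have : ((t + 1) - 1).toNat = t.toNat := by omega
            rw [this]; exact hrow t.toNat le_rfl)
        exact ⟨b', e, p1, p2, p3, fun j hj => p4 j (by omega)⟩

theorem pv_outer_sim (board : List (List String)) (sx sy W : Int) (bad good : String)
    (hW : ((board.getD 0 []).length : Int) = W) (hsx : 0 ≤ sx) (hsy : 0 ≤ sy) (hsyW : sy < W)
    (hRows : ∀ r : Nat, sx.toNat ≤ r → r < board.length → (r : Int) < sx + 8 →
      min (sy + 8) W ≤ ((board.getD r []).length : Int)) :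
    ∀ (k : Nat) (u : Int) (b : List (List String)) (cnt : Int) (colPrev : String),
      sx < u → u ≤ (board.length : Int) → u + k ≤ sx + 8 →
      b.length = board.length →
      (∀ r : Nat, (b.getD r []).length = (board.getD r []).length) →
      (∀ r : Nat, u ≤ (r : Int) → b.getD r [] = board.getD r []) →
      (b.getD (u - 1).toNat []).getD sy.toNat "" = colPrev →
      (pvOuterA sx sy bad good (PySem.List.pyRange u (u + k) 1) b cnt).2
        = pvColGo board sy (min (sy + 8) W)
            (PySem.List.pyRange u (min (u + k) (board.length : Int)) 1) colPrev cnt := by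
  intro k
  induction k with
  | zero =>
    intro u b cnt colPrev hu huL huk hblen hrlens huntouched hcol
    rw [PySem.List.pyRange_one_eq_nil (by push_cast; omega),
        PySem.List.pyRange_one_eq_nil (by push_cast; omega)]
    rfl
  | succ n ih =>
    intro u b cnt colPrev hu huL huk hblen hrlens huntouched hcol
    have hL0 : ((b.getD 0 []).length : Int) = W := by rw [hrlens 0]; exact hW
    rw [PySem.List.pyRange_one_cons (by push_cast; omega)]
    simp only [pvOuterA]
    by_cases hUL : u = (board.length : Int)
    · rw [if_pos (by omega)]
      rw [show min (u + ((n + 1 : Nat) : Int)) (board.length : Int) = u by push_cast; omega,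
          PySem.List.pyRange_one_eq_nil le_rfl]
      rfl
    · rw [if_neg (by omega)]
      rw [PySem.List.pyRange_one_cons (by omega : sy < sy + 8)]
      simp only [pvInnerA]
      rw [if_neg (by omega), if_neg (by rintro ⟨h1, -⟩; omega), if_pos trivial]
      have hbu : b.getD u.toNat [] = board.getD u.toNat [] := huntouched u.toNat (by omega)
      have hcol' : pvGetCell b (u - 1) sy = colPrev := hcol
      have hcurA : pvGetCell b u sy = (board.getD u.toNat []).getD sy.toNat "" := by
        show (b.getD u.toNat []).getD sy.toNat "" = _
        rw [hbu]
      have hrowlen : min (sy + 8) W ≤ ((board.getD u.toNat []).length : Int) :=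
        hRows u.toNat (by omega) (by omega) (by omega)
      have hsylt : sy.toNat < (board.getD u.toNat []).length := by omega
      have hub : u.toNat < b.length := by omega
      have hcast : u + ((n + 1 : Nat) : Int) = (u + 1) + (n : Nat) := by push_cast; ring
      rw [hcol', hcurA, hcast]
      rw [PySem.List.pyRange_one_cons
            (by omega : u < min ((u + 1) + (n : Nat)) (board.length : Int))]
      simp only [pvColGo]
      by_cases heq : (board.getD u.toNat []).getD sy.toNat "" = colPrev
      · rw [if_pos heq.symm, if_pos heq]
        have hset := pv_getD_setCell_self b u sy
          (if (board.getD u.toNat []).getD sy.toNat "" = "B" then "W" else "B") hub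
        have hinner := pv_inner_sim sx sy u bad good W (board.getD u.toNat []) hrowlen
          (by omega) (by omega) 7 (sy + 1)
          (pvSetCell b u sy (if (board.getD u.toNat []).getD sy.toNat "" = "B" then "W" else "B"))
          (cnt + 1) (pvFlip ((board.getD u.toNat []).getD sy.toNat ""))
          (by omega) (by omega) (by push_cast; omega)
          (by rw [pv_len_setCell]; exact hub)
          (by rw [pv_rowlen_setCell]; exact hL0)
          (by rw [hset, List.length_set, hbu])
          (by
            intro j hj
            rw [hset, pv_getD_set_ne _ _ _ _ (by omega), hbu])
          (by
            rw [show ((sy + 1) - 1).toNat = sy.toNat by omega, hset,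
                pv_getD_set_self _ _ _ (by rw [hbu]; exact hsylt)]
            rfl)
        rw [show (sy + 1) + ((7 : Nat) : Int) = sy + 8 by push_cast; ring] at hinner
        obtain ⟨b3, e, p1, p2, p3, p4⟩ := hinner
        rw [e]
        exact ih (u + 1) b3 _ (pvFlip ((board.getD u.toNat []).getD sy.toNat ""))
          (by omega) (by omega) (by omega)
          (by rw [p1, pv_len_setCell]; exact hblen)
          (by intro r; rw [p2 r, pv_rowlen_setCell]; exact hrlens r)
          (by
            intro r hr
            rw [p3 r (by omega), pv_getD_setCell_ne _ _ _ _ _ (by omega)]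
            exact huntouched r (by omega))
          (by
            rw [show ((u + 1) - 1).toNat = u.toNat by omega,
                p4 sy.toNat (by omega), hset,
                pv_getD_set_self _ _ _ (by rw [hbu]; exact hsylt)]
            rfl)
      · rw [if_neg (fun h => heq h.symm), if_neg heq]
        have hinner := pv_inner_sim sx sy u bad good W (board.getD u.toNat []) hrowlen
          (by omega) (by omega) 7 (sy + 1) b cnt
          ((board.getD u.toNat []).getD sy.toNat "")
          (by omega) (by omega) (by push_cast; omega)
          hub hL0 (by rw [hbu])
          (by intro j hj; rw [hbu])
          (by rw [show ((sy + 1) - 1).toNat = sy.toNat by omega, hbu])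
        rw [show (sy + 1) + ((7 : Nat) : Int) = sy + 8 by push_cast; ring] at hinner
        obtain ⟨b3, e, p1, p2, p3, p4⟩ := hinner
        rw [e]
        exact ih (u + 1) b3 _ ((board.getD u.toNat []).getD sy.toNat "")
          (by omega) (by omega) (by omega)
          (by rw [p1]; exact hblen)
          (by intro r; rw [p2 r]; exact hrlens r)
          (by
            intro r hr
            rw [p3 r (by omega)]
            exact huntouched r (by omega))
          (by
            rw [show ((u + 1) - 1).toNat = u.toNat by omega,
                p4 sy.toNat (by omega), hbu])

theorem pv_outer_noop (sx sy : Int) (bad good : String) :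
    ∀ (k : Nat) (u : Int) (b : List (List String)) (cnt : Int),
      ((b.getD 0 []).length : Int) = sy →
      pvOuterA sx sy bad good (PySem.List.pyRange u (u + k) 1) b cnt = (b, cnt) := by
  intro k
  induction k with
  | zero =>
    intro u b cnt h
    rw [PySem.List.pyRange_one_eq_nil (by push_cast; omega)]
    rfl
  | succ n ih =>
    intro u b cnt h
    rw [PySem.List.pyRange_one_cons (by push_cast; omega)]
    simp only [pvOuterA]
    split
    · rfl
    · rw [PySem.List.pyRange_one_cons (by omega : sy < sy + 8)]
      simp only [pvInnerA]
      rw [if_pos h.symm]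
      have : u + ((n + 1 : Nat) : Int) = (u + 1) + (n : Nat) := by push_cast; ring
      rw [this]
      exact ih (u + 1) b cnt h

theorem pv_pass_sim (board : List (List String)) (sx sy : Int) (bad : String)
    (hsx : 0 ≤ sx) (hsxL : sx < (board.length : Int)) (hsy : 0 ≤ sy)
    (hsyW : sy < ((board.getD 0 []).length : Int))
    (hRows : ∀ r : Nat, sx.toNat ≤ r → r < board.length → (r : Int) < sx + 8 →
      min (sy + 8) ((board.getD 0 []).length : Int) ≤ ((board.getD r []).length : Int)) :
    (pvOuterA sx sy bad (pvFlip bad) (PySem.List.pyRange sx (sx + 8) 1) board 0).2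
      = pvPattern board sx sy (min (sx + 8) (board.length : Int))
          (min (sy + 8) ((board.getD 0 []).length : Int)) bad := by
  have hrow0 : min (sy + 8) ((board.getD 0 []).length : Int)
      ≤ ((board.getD sx.toNat []).length : Int) :=
    hRows sx.toNat le_rfl (by omega) (by omega)
  have hsxb : sx.toNat < board.length := by omega
  have hsylt : sy.toNat < (board.getD sx.toNat []).length := by omega
  rw [PySem.List.pyRange_one_cons (by omega : sx < sx + 8)]
  simp only [pvOuterA]
  rw [if_neg (by omega)]
  rw [PySem.List.pyRange_one_cons (by omega : sy < sy + 8)]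
  simp only [pvInnerA]
  rw [if_neg (by omega), if_pos (by simp)]
  simp only [pvPattern, pvGetCell]
  by_cases ho : (board.getD sx.toNat []).getD sy.toNat "" = bad
  · rw [if_pos ho, if_pos ho, if_pos ho]
    have hgood : pvFlip bad = pvFlip ((board.getD sx.toNat []).getD sy.toNat "") := by
      rw [ho]
    rw [hgood]
    have hset := pv_getD_setCell_self board sx sy
      (pvFlip ((board.getD sx.toNat []).getD sy.toNat "")) hsxb
    have hinner := pv_inner_sim sx sy sx bad
      (pvFlip ((board.getD sx.toNat []).getD sy.toNat ""))
      ((board.getD 0 []).length : Int) (board.getD sx.toNat []) hrow0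
      hsx hsy 7 (sy + 1)
      (pvSetCell board sx sy (pvFlip ((board.getD sx.toNat []).getD sy.toNat "")))
      (0 + 1) (pvFlip ((board.getD sx.toNat []).getD sy.toNat ""))
      (by omega) (by omega) (by push_cast; omega)
      (by rw [pv_len_setCell]; exact hsxb)
      (by rw [pv_rowlen_setCell])
      (by rw [hset, List.length_set])
      (by intro j hj; rw [hset, pv_getD_set_ne _ _ _ _ (by omega)])
      (by
        rw [show ((sy + 1) - 1).toNat = sy.toNat by omega, hset,
            pv_getD_set_self _ _ _ hsylt])
    rw [show (sy + 1) + ((7 : Nat) : Int) = sy + 8 by push_cast; ring] at hinner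
    obtain ⟨b3, e, p1, p2, p3, p4⟩ := hinner
    rw [e]
    have houter := pv_outer_sim board sx sy ((board.getD 0 []).length : Int) bad
      (pvFlip ((board.getD sx.toNat []).getD sy.toNat "")) rfl hsx hsy hsyW hRows
      7 (sx + 1) b3
      ((pvRowGo (board.getD sx.toNat [])
          (PySem.List.pyRange (sy + 1) (min (sy + 8) ((board.getD 0 []).length : Int)) 1)
          (pvFlip ((board.getD sx.toNat []).getD sy.toNat "")) (0 + 1)).2)
      (pvFlip ((board.getD sx.toNat []).getD sy.toNat ""))
      (by omega) (by omega) (by push_cast; omega)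
      (by rw [p1, pv_len_setCell])
      (by intro r; rw [p2 r, pv_rowlen_setCell])
      (by
        intro r hr
        rw [p3 r (by omega), pv_getD_setCell_ne _ _ _ _ _ (by omega)])
      (by
        rw [show ((sx + 1) - 1).toNat = sx.toNat by omega,
            p4 sy.toNat (by omega), hset, pv_getD_set_self _ _ _ hsylt])
    rw [show (sx + 1) + ((7 : Nat) : Int) = sx + 8 by push_cast; ring] at houter
    refine Eq.trans houter ?_
    simp only [zero_add]
  · rw [if_neg ho, if_neg ho, if_neg ho]
    have hinner := pv_inner_sim sx sy sx bad (pvFlip bad)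
      ((board.getD 0 []).length : Int) (board.getD sx.toNat []) hrow0
      hsx hsy 7 (sy + 1) board 0
      ((board.getD sx.toNat []).getD sy.toNat "")
      (by omega) (by omega) (by push_cast; omega)
      hsxb rfl rfl (fun j hj => rfl)
      (by rw [show ((sy + 1) - 1).toNat = sy.toNat by omega])
    rw [show (sy + 1) + ((7 : Nat) : Int) = sy + 8 by push_cast; ring] at hinner
    obtain ⟨b3, e, p1, p2, p3, p4⟩ := hinner
    rw [e]
    have houter := pv_outer_sim board sx sy ((board.getD 0 []).length : Int) bad
      (pvFlip bad) rfl hsx hsy hsyW hRows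
      7 (sx + 1) b3
      ((pvRowGo (board.getD sx.toNat [])
          (PySem.List.pyRange (sy + 1) (min (sy + 8) ((board.getD 0 []).length : Int)) 1)
          ((board.getD sx.toNat []).getD sy.toNat "") 0).2)
      ((board.getD sx.toNat []).getD sy.toNat "")
      (by omega) (by omega) (by push_cast; omega)
      (by rw [p1])
      (by intro r; rw [p2 r])
      (fun r hr => p3 r (by omega))
      (by rw [show ((sx + 1) - 1).toNat = sx.toNat by omega, p4 sy.toNat (by omega)])
    rw [show (sx + 1) + ((7 : Nat) : Int) = sx + 8 by push_cast; ring] at houter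
    exact houter

-- proof-side structural forms of B's computation
def pvRepr (p : String) (f : Bool) : String := if f then pvFlip p else p

def pvOneLoop : List (List String) → List String → List Bool → Int → Int
  | [], _, _, c => c
  | col :: rest, prevcol, fs, c =>
    let n := (prevcol.zip (fs.zip col)).map (fun t => pvStep t.1 t.2.1 t.2.2)
    pvOneLoop rest col n (c + pvSumB n)

-- row-major reading of the lockstep loop: per-row flag chains over the columns
def pvRowsSum : List String → List Bool → List (List String) → Int
  | [], _, _ => 0
  | _, [], _ => 0
  | p :: ps, f :: fs, cols =>
    pvSumB (pvChainFlags p f (cols.map (fun col => col.getD 0 "")))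
      + pvRowsSum ps fs (cols.map List.tail)

-- per-row sums with the rows' value lists given directly
def pvPairSum : List String → List Bool → List (List String) → Int
  | p :: ps, f :: fs, vs :: vss => pvSumB (pvChainFlags p f vs) + pvPairSum ps fs vss
  | _, _, _ => 0

-- row-major reading of A's column+row scans as flag chains
def pvColTotal (sy endY : Int) : String → Bool → List (List String) → Int
  | _, _, [] => 0
  | po, pf, row :: rows =>
    let c := row.getD sy.toNat ""
    let f := pvStep po pf c
    (if f then (1 : Int) else 0)
      + pvSumB (pvChainFlags c f ((PySem.List.pyRange (sy + 1) endY 1).map (fun y => row.getD y.toNat "")))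
      + pvColTotal sy endY c f rows

theorem pvSumB_cons (f : Bool) (fs : List Bool) :
    pvSumB (f :: fs) = (if f then 1 else 0) + pvSumB fs := by
  simp [pvSumB]

theorem pv_split (cols : List (List String)) :
    ∀ (prevcol : List String) (fW fB : List Bool) (cW cB : Int),
    pvColsLoop cols prevcol fW fB cW cB
      = (pvOneLoop cols prevcol fW cW, pvOneLoop cols prevcol fB cB) := by
  induction cols with
  | nil => intro _ _ _ _ _; rfl
  | cons col rest ih =>
    intro prevcol fW fB cW cB
    simp only [pvColsLoop, pvOneLoop]
    exact ih _ _ _ _ _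

theorem pv_row_flags (row : List String) :
    ∀ (ys : List Int) (po : String) (pf : Bool) (cnt : Int),
    (pvRowGo row ys (pvRepr po pf) cnt).2
      = cnt + pvSumB (pvChainFlags po pf (ys.map (fun y => row.getD y.toNat ""))) := by
  intro ys
  induction ys with
  | nil => intro po pf cnt; simp [pvRowGo, pvChainFlags, pvSumB]
  | cons y ys ih =>
    intro po pf cnt
    simp only [pvRowGo, List.map_cons, pvChainFlags]
    by_cases h : row.getD y.toNat "" = pvRepr po pf
    · rw [if_pos h]
      have hs : pvStep po pf (row.getD y.toNat "") = true := by
        simp [pvStep, pvRepr] at h ⊢; exact h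
      have ihx := ih (row.getD y.toNat "") true (cnt + 1)
      simp only [pvRepr, Bool.false_eq_true, eq_self_iff_true, if_false, if_true, reduceIte] at ihx
      rw [ihx, hs, pvSumB_cons]
      norm_num
      try ring
    · rw [if_neg h]
      have hs : pvStep po pf (row.getD y.toNat "") = false := by
        simp [pvStep, pvRepr] at h ⊢; exact h
      have ihx := ih (row.getD y.toNat "") false cnt
      simp only [pvRepr, Bool.false_eq_true, eq_self_iff_true, if_false, if_true, reduceIte] at ihx
      rw [ihx, hs, pvSumB_cons]
      norm_num
      try ring

theorem pv_colgo_total (board : List (List String)) (sy endY : Int) :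
    ∀ (xs : List Int) (po : String) (pf : Bool) (cnt : Int),
    pvColGo board sy endY xs (pvRepr po pf) cnt
      = cnt + pvColTotal sy endY po pf (xs.map (fun x => board.getD x.toNat [])) := by
  intro xs
  induction xs with
  | nil => intro po pf cnt; simp [pvColGo, pvColTotal]
  | cons x xs ih =>
    intro po pf cnt
    simp only [pvColGo, List.map_cons, pvColTotal]
    by_cases h : (board.getD x.toNat []).getD sy.toNat "" = pvRepr po pf
    · rw [if_pos h]
      have hs : pvStep po pf ((board.getD x.toNat []).getD sy.toNat "") = true := by
        simp [pvStep, pvRepr] at h ⊢; exact h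
      have ihx := ih ((board.getD x.toNat []).getD sy.toNat "") true
      simp only [pvRepr, Bool.false_eq_true, eq_self_iff_true, if_false, if_true, reduceIte] at ihx
      have hr := pv_row_flags (board.getD x.toNat []) (PySem.List.pyRange (sy + 1) endY 1)
        ((board.getD x.toNat []).getD sy.toNat "") true (cnt + 1)
      simp only [pvRepr, Bool.false_eq_true, eq_self_iff_true, if_false, if_true, reduceIte] at hr
      rw [ihx, hr, hs]
      norm_num
      try ring
    · rw [if_neg h]
      have hs : pvStep po pf ((board.getD x.toNat []).getD sy.toNat "") = false := by
        simp [pvStep, pvRepr] at h ⊢; exact h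
      have ihx := ih ((board.getD x.toNat []).getD sy.toNat "") false
      simp only [pvRepr, Bool.false_eq_true, eq_self_iff_true, if_false, if_true, reduceIte] at ihx
      have hr := pv_row_flags (board.getD x.toNat []) (PySem.List.pyRange (sy + 1) endY 1)
        ((board.getD x.toNat []).getD sy.toNat "") false cnt
      simp only [pvRepr, Bool.false_eq_true, eq_self_iff_true, if_false, if_true, reduceIte] at hr
      rw [ihx, hr, hs]
      norm_num
      try ring

theorem pv_colTotal_split (sy endY : Int) :
    ∀ (rows : List (List String)) (po : String) (pf : Bool),
    pvColTotal sy endY po pf rows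
      = pvSumB (pvChainFlags po pf (rows.map (fun row => row.getD sy.toNat "")))
        + pvPairSum (rows.map (fun row => row.getD sy.toNat ""))
            (pvChainFlags po pf (rows.map (fun row => row.getD sy.toNat "")))
            (rows.map (fun row => (PySem.List.pyRange (sy + 1) endY 1).map (fun y => row.getD y.toNat ""))) := by
  intro rows
  induction rows with
  | nil => intro po pf; simp [pvColTotal, pvChainFlags, pvPairSum, pvSumB]
  | cons row rows ih =>
    intro po pf
    simp only [pvColTotal, List.map_cons, pvChainFlags, pvPairSum, pvSumB_cons]
    rw [ih]
    ring

theorem pvOneLoop_add (cols : List (List String)) :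
    ∀ (prevcol : List String) (fs : List Bool) (a c : Int),
    pvOneLoop cols prevcol fs (a + c) = a + pvOneLoop cols prevcol fs c := by
  induction cols with
  | nil => intro _ _ _ _; rfl
  | cons col rest ih =>
    intro prevcol fs a c
    simp only [pvOneLoop]
    rw [add_assoc]
    exact ih _ _ _ _

theorem pv_loop_nil (cols : List (List String)) :
    ∀ (fs : List Bool) (c : Int), (∀ col ∈ cols, col.length = 0) →
    pvOneLoop cols [] fs c = c := by
  induction cols with
  | nil => intro _ _ _; rfl
  | cons col rest ih =>
    intro fs c hlen
    have hc : col = [] := List.length_eq_zero_iff.mp (hlen col (by simp))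
    subst hc
    have step : pvOneLoop ([] :: rest) [] fs c = pvOneLoop rest [] [] (c + pvSumB []) := rfl
    rw [step, show (pvSumB [] : Int) = 0 from rfl, add_zero]
    exact ih _ _ (fun col h => hlen col (by simp [h]))

theorem pv_loop_peel :
    ∀ (cols : List (List String)) (p : String) (ps : List String) (f : Bool) (fs : List Bool) (c : Int),
    (∀ col ∈ cols, col.length = ps.length + 1) →
    pvOneLoop cols (p :: ps) (f :: fs) c
      = pvSumB (pvChainFlags p f (cols.map (fun col => col.getD 0 "")))
        + pvOneLoop (cols.map List.tail) ps fs c := by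
  intro cols
  induction cols with
  | nil => intro p ps f fs c _; simp [pvOneLoop, pvChainFlags, pvSumB]
  | cons col rest ih =>
    intro p ps f fs c hlen
    obtain ⟨ch, ct, rfl⟩ : ∃ ch ct, col = ch :: ct := by
      cases col with
      | nil => exact absurd (hlen [] (by simp)) (by simp)
      | cons a b => exact ⟨a, b, rfl⟩
    simp only [pvOneLoop, List.map_cons, List.zip_cons_cons, List.tail_cons, pvChainFlags,
      List.getD_cons_zero, pvSumB_cons]
    rw [ih ch ct (pvStep p f ch)
          ((ps.zip (fs.zip ct)).map (fun t => pvStep t.1 t.2.1 t.2.2)) (c + _)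
          (by
            intro col hcol
            have := hlen col (by simp [hcol])
            have hct : ct.length = ps.length := by
              have := hlen (ch :: ct) (by simp)
              simpa using this
            omega),
        pvOneLoop_add]
    rw [pvOneLoop_add, pvOneLoop_add]
    ring

theorem pv_loop_rows :
    ∀ (prevcol : List String) (fs : List Bool) (cols : List (List String)) (c : Int),
    (∀ col ∈ cols, col.length = prevcol.length) → fs.length = prevcol.length →
    pvOneLoop cols prevcol fs c = c + pvRowsSum prevcol fs cols := by
  intro prevcol
  induction prevcol with
  | nil =>
    intro fs cols c hlen _
    rw [pv_loop_nil cols fs c (by intro col h; simpa using hlen col h)]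
    simp [pvRowsSum]
  | cons p ps ih =>
    intro fs cols c hlen hfs
    cases fs with
    | nil => simp at hfs
    | cons f fs =>
      rw [pv_loop_peel cols p ps f fs c (by intro col h; simpa using hlen col h)]
      rw [ih fs (cols.map List.tail) c
            (by
              intro col h
              obtain ⟨col', hcol', rfl⟩ := List.mem_map.mp h
              have := hlen col' hcol'
              simp at this ⊢
              omega)
            (by simpa using hfs)]
      simp only [pvRowsSum]
      ring

theorem pv_getD_tail {α : Type} [Inhabited α] (l : List α) (r : Nat) (d : α) :
    l.tail.getD r d = l.getD (r + 1) d := by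
  cases l <;> simp [List.getD]

theorem pv_rowsSum_vals :
    ∀ (ps : List String) (fs : List Bool) (cols valss : List (List String)),
    valss.length = ps.length → fs.length = ps.length →
    (∀ r : Nat, r < ps.length →
      cols.map (fun col => col.getD r "") = valss.getD r []) →
    pvRowsSum ps fs cols = pvPairSum ps fs valss := by
  intro ps
  induction ps with
  | nil =>
    intro fs cols valss h1 _ _
    have : valss = [] := List.length_eq_zero_iff.mp (by simpa using h1)
    subst this
    cases fs <;> simp [pvRowsSum, pvPairSum]
  | cons p ps ih =>
    intro fs cols valss h1 h2 hv
    cases fs with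
    | nil => simp at h2
    | cons f fs =>
      cases valss with
      | nil => simp at h1
      | cons vs vss =>
        simp only [pvRowsSum, pvPairSum]
        have h0 := hv 0 (by simp)
        simp only [List.getD_cons_zero] at h0
        rw [h0, ih fs (cols.map List.tail) vss (by simpa using h1) (by simpa using h2)
              (by
                intro r hr
                have := hv (r + 1) (by simpa using Nat.succ_lt_succ hr)
                simp only [List.getD_cons_succ] at this
                rw [← this, List.map_map]
                apply List.map_congr_left
                intro col _
                exact pv_getD_tail col r "")]


theorem pv_chain_len : ∀ (l : List String) (p : String) (f : Bool),
    (pvChainFlags p f l).length = l.length := by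
  intro l
  induction l with
  | nil => intro _ _; rfl
  | cons c cs ih => intro p f; simp [pvChainFlags, ih]

theorem pv_getD_map {α β : Type} (l : List α) (g : α → β) (r : Nat)
    (hr : r < l.length) (d : β) (d0 : α) :
    (l.map g).getD r d = g (l.getD r d0) := by
  simp [List.getD_eq_getElem?_getD, List.getElem?_eq_getElem hr]

theorem pv_getD_take {α : Type} (l : List α) (t r : Nat) (hr : r < t) (d : α) :
    (l.take t).getD r d = l.getD r d := by
  simp [List.getD_eq_getElem?_getD, List.getElem?_take, hr]

theorem pv_getD_drop {α : Type} (l : List α) (a r : Nat) (d : α) :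
    (l.drop a).getD r d = l.getD (a + r) d := by
  simp [List.getD_eq_getElem?_getD, List.getElem?_drop]

theorem pv_alt_main (board : List (List String)) (sx sy : Int)
    (hsx : 0 ≤ sx) (hsxL : sx < (board.length : Int)) (hsy : 0 ≤ sy)
    (hsyW : sy < ((board.getD 0 []).length : Int)) :
    checkCount_alt board sx sy
      = min (pvPattern board sx sy (min (sx + 8) (board.length : Int))
              (min (sy + 8) ((board.getD 0 []).length : Int)) "B")
            (pvPattern board sx sy (min (sx + 8) (board.length : Int))
              (min (sy + 8) ((board.getD 0 []).length : Int)) "W") := by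
  have hcond : ¬ (sx = (board.length : Int) ∨ sy = ((board.getD 0 []).length : Int)) := by
    rintro (h | h) <;> omega
  simp only [checkCount_alt, if_neg hcond]
  -- abbreviations (abstracting the matching subterms of the goal)
  set wI : Int := min (sy + 8) ((board.getD 0 []).length : Int) - sy with hwI
  set endX : Int := min (sx + 8) (board.length : Int) with hendX
  set endY : Int := min (sy + 8) ((board.getD 0 []).length : Int) with hendY
  have hw1 : 1 ≤ wI := by omega
  set m : Nat := wI.toNat - 1 with hm
  have hwm : wI.toNat = m + 1 := by omega
  set hN : Nat := min 8 (board.length - sx.toNat) with hhN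
  have hN1 : 1 ≤ hN := by omega
  set win := ((board.drop sx.toNat).take 8).map
      (fun row => (row.drop sy.toNat).take wI.toNat) with hwin
  have hwinlen : win.length = hN := by
    simp [hwin, hhN]
  have hcell : ∀ r j : Nat, r < hN → j < wI.toNat →
      (win.getD r []).getD j "" = (board.getD (sx.toNat + r) []).getD (sy.toNat + j) "" := by
    intro r j hr hj
    rw [hwin, pv_getD_map _ _ r (by simp; omega) [] [],
        pv_getD_take _ 8 r (by omega), pv_getD_drop,
        pv_getD_take _ wI.toNat j hj, pv_getD_drop]
  -- a column of the window, as board cells along the rows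
  have hM : ∀ j : Nat, j < wI.toNat →
      win.map (fun row => row.getD j "")
        = (PySem.List.pyRange sx endX 1).map
            (fun x => (board.getD x.toNat []).getD (sy.toNat + j) "") := by
    intro j hj
    apply List.ext_getElem
    · simp [hwinlen, PySem.List.length_pyRange_one]
      omega
    · intro r h1 h2
      have hr' : r < win.length := by simpa using h1
      have hrN : r < hN := by omega
      simp only [List.getElem_map, PySem.List.getElem_pyRange_one]
      rw [← List.getD_eq_getElem win [] hr', hcell r j hrN hj,
          show (sx + (r : Int)).toNat = sx.toNat + r by omega]
  have hsxlt : sx < endX := by omega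
  set o := (board.getD sx.toNat []).getD sy.toNat "" with ho
  set tailcells := (PySem.List.pyRange (sx + 1) endX 1).map
      (fun x => (board.getD x.toNat []).getD sy.toNat "") with htailcells
  have hcol0 : win.map (fun row => row.getD 0 "") = o :: tailcells := by
    rw [hM 0 (by omega), PySem.List.pyRange_one_cons hsxlt, List.map_cons]
    simp [ho, htailcells]
  have htlen : tailcells.length = hN - 1 := by
    simp [htailcells, PySem.List.length_pyRange_one]
    omega
  set vals0 := (PySem.List.pyRange (sy + 1) endY 1).map
      (fun y => (board.getD sx.toNat []).getD y.toNat "") with hvals0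
  set valsstail := (PySem.List.pyRange (sx + 1) endX 1).map
      (fun x => (PySem.List.pyRange (sy + 1) endY 1).map
        (fun y => (board.getD x.toNat []).getD y.toNat "")) with hvalsstail
  set valss := (PySem.List.pyRange sx endX 1).map
      (fun x => (PySem.List.pyRange (sy + 1) endY 1).map
        (fun y => (board.getD x.toNat []).getD y.toNat "")) with hvalss
  have hvsplit : valss = vals0 :: valsstail := by
    rw [hvalss, PySem.List.pyRange_one_cons hsxlt, List.map_cons]
  set colsTailT := (List.range m).map
      (fun j => win.map (fun row => row.getD (j + 1) "")) with hcolsTailT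
  -- one B-side lockstep pass equals one A-side carried-value pattern pass
  have hpass : ∀ bad : String,
      pvOneLoop colsTailT (o :: tailcells)
          ((o == bad) :: pvChainFlags o (o == bad) tailcells)
          (pvSumB ((o == bad) :: pvChainFlags o (o == bad) tailcells))
        = pvPattern board sx sy endX endY bad := by
    intro bad
    have hlens : ∀ col ∈ colsTailT, col.length = (o :: tailcells).length := by
      intro col hcol
      obtain ⟨j, _, rfl⟩ := List.mem_map.mp hcol
      simp [hwinlen, htlen]
      omega
    have hflen : (((o == bad) :: pvChainFlags o (o == bad) tailcells)).length
        = (o :: tailcells).length := by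
      simp [pv_chain_len]
    have hvlen : valss.length = (o :: tailcells).length := by
      simp [hvalss, PySem.List.length_pyRange_one, htlen]
      omega
    have hv : ∀ r : Nat, r < (o :: tailcells).length →
        colsTailT.map (fun col => col.getD r "") = valss.getD r [] := by
      intro r hr
      have hrN : r < hN := by simp [htlen] at hr; omega
      rw [hcolsTailT, List.map_map]
      have hL : ((List.range m).map
            ((fun col => col.getD r "") ∘ (fun j => win.map (fun row => row.getD (j + 1) ""))))
          = (List.range m).map
              (fun j => (board.getD (sx.toNat + r) []).getD (sy.toNat + (j + 1)) "") := by
        apply List.map_congr_left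
        intro j hj
        have hjm : j < m := List.mem_range.mp hj
        show (win.map (fun row => row.getD (j + 1) "")).getD r "" = _
        rw [pv_getD_map _ _ r (by omega : r < win.length) "" [],
            hcell r (j + 1) hrN (by omega)]
      rw [hL, hvalss,
          pv_getD_map _ _ r (by simp [PySem.List.length_pyRange_one]; omega) [] (0 : Int),
          show (PySem.List.pyRange sx endX 1).getD r 0 = sx + (r : Int) from by
            rw [List.getD_eq_getElem _ _ (by simp [PySem.List.length_pyRange_one]; omega),
                PySem.List.getElem_pyRange_one],
          PySem.List.pyRange_one, List.map_map,
          show ((endY - (sy + 1)).toNat) = m by omega]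
      apply List.map_congr_left
      intro j hj
      have hjm : j < m := List.mem_range.mp hj
      show (board.getD (sx.toNat + r) []).getD (sy.toNat + (j + 1)) ""
          = (board.getD (sx + (r : Int)).toNat []).getD (sy + 1 + (j : Int)).toNat ""
      rw [show (sx + (r : Int)).toNat = sx.toNat + r by omega,
          show (sy + 1 + (j : Int)).toNat = sy.toNat + (j + 1) by omega]
    -- A side: pattern pass through the flag chains
    have hrows1a : ((PySem.List.pyRange (sx + 1) endX 1).map
          (fun x => board.getD x.toNat [])).map (fun row => row.getD sy.toNat "")
        = tailcells := by
      rw [List.map_map]; rfl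
    have hrows1b : ((PySem.List.pyRange (sx + 1) endX 1).map
          (fun x => board.getD x.toNat [])).map
          (fun row => (PySem.List.pyRange (sy + 1) endY 1).map (fun y => row.getD y.toNat ""))
        = valsstail := by
      rw [List.map_map]; rfl
    have hA : pvPattern board sx sy endX endY bad
        = (if (o == bad) then (1 : Int) else 0)
          + pvSumB (pvChainFlags o (o == bad) vals0)
          + (pvSumB (pvChainFlags o (o == bad) tailcells)
            + pvPairSum tailcells (pvChainFlags o (o == bad) tailcells) valsstail) := by
      have hcp : (if o = bad then pvFlip o else o) = pvRepr o (o == bad) := by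
        by_cases hob : o = bad
        · simp [pvRepr, hob]
        · simp [pvRepr, hob]
      have hc0 : (if o = bad then (1 : Int) else 0)
          = (if (o == bad) then (1 : Int) else 0) := by
        by_cases hob : o = bad
        · simp [hob]
        · simp [hob]
      show (let row0 := board.getD sx.toNat []
            let o' := row0.getD sy.toNat ""
            let cp := if o' = bad then pvFlip o' else o'
            let c0 : Int := if o' = bad then 1 else 0
            let c1 := (pvRowGo row0 (PySem.List.pyRange (sy + 1) endY 1) cp c0).2
            pvColGo board sy endY (PySem.List.pyRange (sx + 1) endX 1) cp c1) = _
      simp only []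
      rw [hcp, hc0, pv_row_flags, pv_colgo_total, pv_colTotal_split, hrows1a, hrows1b]
      try rw [hvals0]
      try ring
    rw [pv_loop_rows (o :: tailcells)
          ((o == bad) :: pvChainFlags o (o == bad) tailcells) colsTailT
          (pvSumB ((o == bad) :: pvChainFlags o (o == bad) tailcells)) hlens hflen,
        pv_rowsSum_vals (o :: tailcells)
          ((o == bad) :: pvChainFlags o (o == bad) tailcells) colsTailT valss
          hvlen hflen hv,
        hA, hvsplit]
    simp only [pvPairSum, pvSumB_cons]
    ring
  -- assemble: rewrite the goal's window/columns into the named forms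
  have hsl : (PySem.List.slice board (some sx) (some (sx + 8))).map
        (fun row => PySem.List.slice row (some sy) (some (sy + wI))) = win := by
    rw [PySem.List.slice_toNat board hsx (by omega),
        show (sx + 8).toNat - sx.toNat = 8 by omega, hwin]
    apply List.map_congr_left
    intro row _
    rw [PySem.List.slice_toNat row hsy (by omega),
        show (sy + wI).toNat - sy.toNat = wI.toNat by omega]
  rw [hsl]
  clear_value win
  have hcols : (List.range wI.toNat).map (fun j => win.map (fun row => row.getD j ""))
      = (o :: tailcells) :: colsTailT := by
    rw [hwm, List.range_succ_eq_map]
    simp only [List.map_cons, List.map_map]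
    rw [hcol0]
    rfl
  rw [hcols]
  simp only [List.getD_cons_zero, List.tail_cons]
  rw [pv_split]
  simp only []
  rw [hpass "B", hpass "W"]

-- ===== VERDICT (by name: the statement is the Claim_ definition above) =====
theorem checkCount_spec : Claim_equal_checkCount := by
  intro board sx sy hdom hpre
  unfold Spec_checkCount
  simp only [checkCount]
  obtain ⟨hsx, hrest⟩ := hpre
  by_cases h0 : sy = ((board.getD 0 []).length : Int)
  · have h8 : (sx + 8 : Int) = sx + ((8 : Nat) : Int) := by norm_num
    rw [h8, pv_outer_noop sx sy "B" "W" 8 sx board 0 h0.symm,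
        pv_outer_noop sx sy "W" "B" 8 sx board 0 h0.symm]
    simp only [checkCount_alt]
    rw [if_pos (Or.inr h0)]
    norm_num
  · rcases hrest with ⟨hne, he⟩ | hxe | ⟨hxe, hsy, hye, hrowsN⟩
    · exact absurd he h0
    · have houter : ∀ bad good : String,
          pvOuterA sx sy bad good (PySem.List.pyRange sx (sx + 8) 1) board 0 = (board, 0) := by
        intro bad good
        rw [PySem.List.pyRange_one_cons (by omega : sx < sx + 8)]
        simp only [pvOuterA]
        rw [if_pos (by omega)]
      rw [houter, houter]
      simp only [checkCount_alt]
      rw [if_pos (Or.inl hxe)]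
      norm_num
    · have hRows : ∀ r : Nat, sx.toNat ≤ r → r < board.length → (r : Int) < sx + 8 →
          min (sy + 8) ((board.getD 0 []).length : Int) ≤ ((board.getD r []).length : Int) := by
        intro r h1 h2 h3
        have := hrowsN r (by omega) (by omega)
        omega
      have hp1 := pv_pass_sim board sx sy "B" hsx hxe hsy hye hRows
      have hp2 := pv_pass_sim board sx sy "W" hsx hxe hsy hye hRows
      rw [show pvFlip "B" = "W" from by decide] at hp1
      rw [show pvFlip "W" = "B" from by decide] at hp2
      rw [hp1, hp2, pv_alt_main board sx sy hsx hxe hsy hye]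
      exact (min_def _ _).symm
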